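-- pv_equiv track=rewrite | github.com/thierryxdp/TCC | problems/831/solution_328820.py | lingua_p
-- ===== SOURCE A (Python) =====
-- def lingua_p(palavra):
--     palavra = palavra.lower()
--     lista = list(palavra)
--     for letra in lista:
--         if letra in "aeiou":
--             indice = lista.index(letra)
--             lista[indice] = '{}p{}'.format(letra, letra)
--     return ''.join(lista)
-- ===== SOURCE B (Python) =====
-- def lingua_p(palavra):
--     return ''.join(c + 'p' + c if c in "aeiou" else c for c in palavra.lower())
-- ===== Notes on version B (the rewrite author's own statement) =====
-- stated objective: faster
-- what changed: A mutates a char list in place, re-scanning it with list.index for every vowel (quadratic); B builds the result in one pass, appending the expanded vowel chunk directly.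
import Mathlib
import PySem

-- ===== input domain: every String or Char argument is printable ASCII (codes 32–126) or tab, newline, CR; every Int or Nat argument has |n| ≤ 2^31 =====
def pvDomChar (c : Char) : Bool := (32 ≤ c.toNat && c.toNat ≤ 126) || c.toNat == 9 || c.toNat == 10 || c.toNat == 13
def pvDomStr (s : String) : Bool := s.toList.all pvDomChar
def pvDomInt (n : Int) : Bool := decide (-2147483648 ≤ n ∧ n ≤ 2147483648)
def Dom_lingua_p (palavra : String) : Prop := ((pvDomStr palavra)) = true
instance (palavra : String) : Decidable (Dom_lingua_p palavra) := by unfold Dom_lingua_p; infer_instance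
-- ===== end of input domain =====

-- B replaces A's quadratic loop (list.index scan per vowel, in-place cell rewrite, final join)
-- by a single pass emitting c+'p'+c per vowel directly; objective: faster (asymptotic).

-- ===== PORT A =====
-- list cells are Python strings, modelled as List Char (PySem string convention)
def lpStepA (lista : List (List Char)) (letra : List Char) : List (List Char) :=
  if PySem.Chars.isIn letra "aeiou".toList then
    match PySem.List.index? lista letra with
    | some idx => lista.set idx (letra ++ 'p' :: letra)   -- '{}p{}'.format(letra, letra)
    | none => lista       -- unreachable: letra was read from lista (Python would raise ValueError)
  else lista

theorem lpStepA_length (lista : List (List Char)) (letra : List Char) :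
    (lpStepA lista letra).length = lista.length := by
  unfold lpStepA; split_ifs with h
  · cases PySem.List.index? lista letra <;> simp
  · rfl

-- 'for letra in lista: …' mutating lista in place: iteration by index over the live list
def lpLoopA (lista : List (List Char)) (i : Nat) : List (List Char) :=
  if h : i < lista.length then
    lpLoopA (lpStepA lista lista[i]) (i + 1)
  else lista
termination_by lista.length - i
decreasing_by simp only [lpStepA_length]; omega

def lingua_p (palavra : String) : String :=
  let cs := PySem.Chars.lower palavra.toList          -- palavra = palavra.lower()
  let lista := cs.map (fun c => [c])                  -- lista = list(palavra)
  String.ofList (PySem.Chars.join [] (lpLoopA lista 0))   -- ''.join(lista)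

-- ===== PORT B =====
def lingua_p_alt (palavra : String) : String :=
  String.ofList ((PySem.Chars.lower palavra.toList).flatMap
    (fun c => if PySem.Chars.isIn [c] "aeiou".toList then [c, 'p', c] else [c]))

-- ===== PRECONDITION & SPEC =====
def Spec_lingua_p (palavra : String) (out : String) : Prop := out = lingua_p_alt palavra
instance (palavra : String) (out : String) : Decidable (Spec_lingua_p palavra out) := by unfold Spec_lingua_p; infer_instance

-- ===== CLAIM (what is proved, stated in full; the proofs are below) =====
def Claim_equal_lingua_p : Prop := ∀ (palavra : String), Dom_lingua_p palavra → Spec_lingua_p palavra (lingua_p palavra)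

-- ===== LEMMAS AND PROOFS =====
-- the per-character rewrite both programs perform
def lpF (c : Char) : List Char :=
  if PySem.Chars.isIn [c] "aeiou".toList then [c, 'p', c] else [c]

theorem lpF_ne_singleton_vowel (d c : Char) (hc : PySem.Chars.isIn [c] "aeiou".toList = true) :
    lpF d ≠ [c] := by
  unfold lpF; split_ifs with hd
  · simp
  · intro h
    have : d = c := by simpa using h
    subst this; exact hd hc

theorem index?_map_lpF_append (pre : List Char) (c : Char) (tail : List (List Char))
    (hc : PySem.Chars.isIn [c] "aeiou".toList = true) :
    PySem.List.index? (pre.map lpF ++ [c] :: tail) [c] = some pre.length := by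
  induction pre with
  | nil => exact PySem.List.index?_cons_self [c] tail
  | cons d pre ih =>
      simp only [List.map_cons, List.cons_append, List.length_cons]
      rw [PySem.List.index?_cons_of_ne _ (lpF_ne_singleton_vowel d c hc), ih]
      rfl

theorem lpLoopA_inv (pre rest : List Char) :
    lpLoopA (pre.map lpF ++ rest.map (fun c => [c])) pre.length = (pre ++ rest).map lpF := by
  induction rest generalizing pre with
  | nil =>
      rw [lpLoopA]
      simp
  | cons c rest ih =>
      rw [lpLoopA]
      have hlen : pre.length < (pre.map lpF ++ (c :: rest).map (fun c => [c])).length := by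
        simp
      rw [dif_pos hlen]
      have hget : (pre.map lpF ++ (c :: rest).map (fun c => [c]))[pre.length] = [c] := by
        rw [List.getElem_append_right (by simp)]
        simp
      rw [hget]
      by_cases hc : PySem.Chars.isIn [c] "aeiou".toList = true
      · have hstep : lpStepA (pre.map lpF ++ (c :: rest).map (fun c => [c])) [c]
            = (pre ++ [c]).map lpF ++ rest.map (fun c => [c]) := by
          unfold lpStepA
          rw [if_pos hc]
          simp only [List.map_cons]
          rw [index?_map_lpF_append pre c _ hc]
          dsimp only
          rw [List.set_append_right _ _ (by simp)]
          simp only [List.length_map, Nat.sub_self, List.set_cons_zero, List.map_append,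
            List.map_cons, List.map_nil, List.append_assoc, List.singleton_append, lpF, if_pos hc]
        rw [hstep]
        have := ih (pre ++ [c])
        simpa using this
      · have hstep : lpStepA (pre.map lpF ++ (c :: rest).map (fun c => [c])) [c]
            = (pre ++ [c]).map lpF ++ rest.map (fun c => [c]) := by
          unfold lpStepA
          rw [if_neg hc]
          simp only [List.map_append, List.map_cons, List.map_nil, lpF, if_neg hc]
          simp
        rw [hstep]
        have := ih (pre ++ [c])
        simpa using this

theorem join_nil_eq_flatten (ps : List (List Char)) : PySem.Chars.join [] ps = ps.flatten := by
  induction ps with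
  | nil => rfl
  | cons a ps ih => cases ps <;> simp_all [PySem.Chars.join, List.intercalate, List.intersperse]

-- ===== VERDICT (by name: the statement is the Claim_ definition above) =====
theorem lingua_p_spec : Claim_equal_lingua_p := by
  intro palavra _
  unfold Spec_lingua_p lingua_p lingua_p_alt
  have h := lpLoopA_inv [] (PySem.Chars.lower palavra.toList)
  simp only [List.map_nil, List.nil_append, List.length_nil] at h
  dsimp only
  rw [h, join_nil_eq_flatten, List.flatMap_def]
  rfl
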